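-- pv_equiv track=rewrite | github.com/samarthraj/Question_Solve | Mar_10_2025/Q6_031025.py | solve
-- ===== SOURCE A (Python) =====
-- def solve(mat):
--
--     #first find the max length
--     count = 0
--     ls = []
--     for i in range(len(mat)):
--         l = mat[i][0]
--         w = mat[i][1]
--         to_trim = min(l, w)
--         ls.append(to_trim)
--
--     for i in ls:
--         if i == max(ls):
--             count += 1
--     return count
-- ===== SOURCE B (Python) =====
-- def solve(mat):
--     best = None
--     count = 0
--     for row in mat:
--         m = min(row[0], row[1])
--         if best is None or m > best:
--             best = m
--             count = 1
--         elif m == best: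
--             count += 1
--     return count
-- ===== Notes on version B (the rewrite author's own statement) =====
-- stated objective: alternative
-- what changed: Single pass keeping a running maximum and its occurrence count in two scalars, instead of building the list of mins and then rescanning it with max(ls) recomputed inside the counting loop.
import Mathlib
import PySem

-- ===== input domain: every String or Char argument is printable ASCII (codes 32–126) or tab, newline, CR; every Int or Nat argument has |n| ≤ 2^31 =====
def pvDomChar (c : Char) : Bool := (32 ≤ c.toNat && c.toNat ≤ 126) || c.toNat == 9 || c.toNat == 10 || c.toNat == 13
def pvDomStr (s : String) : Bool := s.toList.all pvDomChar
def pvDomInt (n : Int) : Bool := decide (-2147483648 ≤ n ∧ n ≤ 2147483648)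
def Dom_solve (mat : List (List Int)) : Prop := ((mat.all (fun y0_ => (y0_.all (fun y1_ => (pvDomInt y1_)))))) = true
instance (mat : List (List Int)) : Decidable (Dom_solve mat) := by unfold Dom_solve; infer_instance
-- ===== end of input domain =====

-- B replaces A's build-a-list-then-rescan (with max(ls) recomputed in the inner test) by one
-- pass holding a running maximum and its count (alternative decomposition); return values
-- proved equal on Pre_.

-- ===== PORT A =====
def solve (mat : List (List Int)) : Int :=
  let ls : List Int :=
    (PySem.List.pyRange 0 (PySem.List.len mat) 1).foldl
      (fun ls i =>
        let row := PySem.List.pyGetD mat i []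
        let l := PySem.List.pyGetD row 0 0
        let w := PySem.List.pyGetD row 1 0
        let to_trim := min l w
        ls ++ [to_trim]) []
  ls.foldl (fun count i =>
      if PySem.List.max? ls (fun x => x) = some i then count + 1 else count) 0

-- ===== PORT B =====
def solve_alt (mat : List (List Int)) : Int :=
  (mat.foldl
    (fun (st : Option Int × Int) row =>
      let m := min (PySem.List.pyGetD row 0 0) (PySem.List.pyGetD row 1 0)
      match st with
      | (none, _) => (some m, 1)
      | (some best, count) =>
        if best < m then (some m, 1)
        else if m = best then (some best, count + 1)
        else (some best, count))
    (none, 0)).2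

-- ===== PRECONDITION & SPEC =====
-- Pre_ excludes matrices containing a row with fewer than two entries, on which both Pythons
-- raise IndexError (row[0] or row[1]).
def Pre_solve (mat : List (List Int)) : Prop := ∀ row ∈ mat, 2 ≤ row.length
instance (mat : List (List Int)) : Decidable (Pre_solve mat) := by unfold Pre_solve; infer_instance
def pvWitness_solve : List (List Int) := [[3, 5], [4, 4], [2, 9]]

def Spec_solve (mat : List (List Int)) (out : Int) : Prop := out = solve_alt mat
instance (mat : List (List Int)) (out : Int) : Decidable (Spec_solve mat out) := by unfold Spec_solve; infer_instance

-- ===== CLAIM (what is proved, stated in full; the proofs are below) =====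
def Claim_equal_solve : Prop := ∀ (mat : List (List Int)), Dom_solve mat → Pre_solve mat → Spec_solve mat (solve mat)

-- ===== LEMMAS AND PROOFS =====

-- the min of a row's first two entries, shared by both reductions
def pvMins (row : List Int) : Int :=
  min (PySem.List.pyGetD row 0 0) (PySem.List.pyGetD row 1 0)

-- B's loop body, on the already-extracted min
def pvStep (st : Option Int × Int) (m : Int) : Option Int × Int :=
  match st with
  | (none, _) => (some m, 1)
  | (some best, count) =>
    if best < m then (some m, 1)
    else if m = best then (some best, count + 1)
    else (some best, count)

lemma solve_alt_eq_foldl_mins (mat : List (List Int)) :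
    solve_alt mat = ((mat.map pvMins).foldl pvStep (none, 0)).2 := by
  rw [List.foldl_map]
  rfl

lemma pvStep_invariant (t : List Int) :
    ∀ (b c : Int),
      t.foldl pvStep (some b, c) =
        (some (t.foldl max b),
         (if b = t.foldl max b then c else 0) + (t.count (t.foldl max b) : Int)) := by
  induction t with
  | nil => intro b c; simp
  | cons m t ih =>
    intro b c
    have hmax := PySem.List.le_foldl_max t m
    have hmax' := PySem.List.le_foldl_max t b
    rcases lt_trichotomy b m with hb | hb | hb
    · have hne : b ≠ t.foldl max m := by have := hmax.1; omega
      simp only [List.foldl_cons, pvStep, if_pos hb, ih, max_eq_right hb.le,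
        if_neg hne, Prod.mk.injEq, List.count_cons, beq_iff_eq, true_and]
      split_ifs <;> push_cast <;> omega
    · subst hb
      simp only [List.foldl_cons, pvStep, lt_self_iff_false, if_false,
        if_true, ih, max_self, Prod.mk.injEq, List.count_cons, beq_iff_eq, true_and]
      split_ifs <;> push_cast <;> omega
    · have hne : m ≠ t.foldl max b := by have := hmax'.1; omega
      simp only [List.foldl_cons, pvStep, if_neg (by omega : ¬ b < m),
        if_neg (by omega : ¬ m = b), ih, max_eq_left hb.le,
        Prod.mk.injEq, List.count_cons, beq_iff_eq, if_neg hne, true_and]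
      split_ifs <;> push_cast <;> omega

-- B on a nonempty list of mins returns the count of the maximum
lemma solve_alt_count (m : Int) (t : List Int) :
    ((m :: t).foldl pvStep (none, 0)).2 = ((m :: t).count (t.foldl max m) : Int) := by
  have h : (m :: t).foldl pvStep (none, 0) = t.foldl pvStep (some m, 1) := rfl
  rw [h, pvStep_invariant t m 1]
  simp only [List.count_cons, beq_iff_eq]
  split_ifs <;> push_cast <;> omega

-- A's first loop builds exactly the list of mins
lemma solve_ls (mat : List (List Int)) :
    (PySem.List.pyRange 0 (PySem.List.len mat) 1).foldl
      (fun ls i =>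
        let row := PySem.List.pyGetD mat i []
        let l := PySem.List.pyGetD row 0 0
        let w := PySem.List.pyGetD row 1 0
        let to_trim := min l w
        ls ++ [to_trim]) [] = mat.map pvMins := by
  show (PySem.List.pyRange 0 (PySem.List.len mat) 1).foldl
      (fun ls i => ls ++ [pvMins (PySem.List.pyGetD mat i [])]) [] = mat.map pvMins
  rw [PySem.List.foldl_pyRange_zero_pyGetD mat []
    (fun ls row => ls ++ [pvMins row]) []]
  simpa using PySem.List.foldl_append_singleton_eq_map (l := mat) (f := pvMins) (acc := [])

-- A's counting loop on a nonempty ls is the count of the maximum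
lemma solve_count (m : Int) (t : List Int) :
    (m :: t).foldl (fun count i =>
        if PySem.List.max? (m :: t) (fun x => x) = some i then count + 1 else count) 0
      = ((m :: t).count (t.foldl max m) : Int) := by
  rw [PySem.List.foldl_ite_add_one
    (p := fun i => PySem.List.max? (m :: t) (fun x => x) = some i)]
  simp only [PySem.List.max?_id_cons, Option.some.injEq, zero_add]
  congr 1
  rw [List.count_eq_countP]
  refine List.countP_congr (fun a _ => ?_)
  by_cases h : a = t.foldl max m
  · subst h; simp
  · simp [h, Ne.symm h]

-- ===== VERDICT (by name: the statement is the Claim_ definition above) =====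
theorem solve_spec : Claim_equal_solve := by
  intro mat _ _
  unfold Spec_solve solve
  rw [solve_alt_eq_foldl_mins, solve_ls]
  cases h : mat.map pvMins with
  | nil => simp
  | cons m t => rw [solve_count, solve_alt_count]
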